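-- pv_equiv track=rewrite | github.com/codybuell/advent-of-code | 2021/day-20/solution.py | spaces_around
-- ===== SOURCE A (Python) =====
-- def spaces_around(coord: list, matrix: list) -> list:
--     """ Provides all spaces around a provided coordinate, constrained by the
--     edges of the 2 dimensional matrix. """
--
--     # set some ranges for edge detection
--     y_range = len(matrix) - 1
--     x_range = len(matrix[0]) - 1
--
--     # define how far out from coord we want to check
--     check_range = range(-1, 2)
--
--     # build a list of all locations around coordinate, account for edge limits on y and x dimensions
--     coords_around = [[min(y_range, max(0, coord[0] + y)), min(x_range, max(0, coord[1] + x))] for y in check_range for x in check_range]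
--
--     # sort and deduplicate them
--     coords_around = [list(x) for x in set(tuple(x) for x in coords_around)]
--     coords_around.sort()
--
--     # remove the coord provided
--     # coords_around.remove(coord)
--
--     return coords_around
-- ===== SOURCE B (Python) =====
-- def spaces_around(coord: list, matrix: list) -> list:
--     """ Provides all spaces around a provided coordinate, constrained by the
--     edges of the 2 dimensional matrix. """
--     # clamping is independent per axis, so build each axis's sorted distinct
--     # clamped values and take their Cartesian product (already in sorted order)
--     y_range = len(matrix) - 1
--     x_range = len(matrix[0]) - 1
--     ys = sorted(set(min(y_range, max(0, coord[0] + d)) for d in range(-1, 2)))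
--     xs = sorted(set(min(x_range, max(0, coord[1] + d)) for d in range(-1, 2)))
--     return [[cy, cx] for cy in ys for cx in xs]
-- ===== Notes on version B (the rewrite author's own statement) =====
-- stated objective: simpler
-- what changed: Instead of building all 9 clamped pairs and then deduplicating and sorting them, B computes the sorted distinct clamped values per axis (at most 3 each) and returns their Cartesian product, which is already sorted and duplicate-free.
import Mathlib
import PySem

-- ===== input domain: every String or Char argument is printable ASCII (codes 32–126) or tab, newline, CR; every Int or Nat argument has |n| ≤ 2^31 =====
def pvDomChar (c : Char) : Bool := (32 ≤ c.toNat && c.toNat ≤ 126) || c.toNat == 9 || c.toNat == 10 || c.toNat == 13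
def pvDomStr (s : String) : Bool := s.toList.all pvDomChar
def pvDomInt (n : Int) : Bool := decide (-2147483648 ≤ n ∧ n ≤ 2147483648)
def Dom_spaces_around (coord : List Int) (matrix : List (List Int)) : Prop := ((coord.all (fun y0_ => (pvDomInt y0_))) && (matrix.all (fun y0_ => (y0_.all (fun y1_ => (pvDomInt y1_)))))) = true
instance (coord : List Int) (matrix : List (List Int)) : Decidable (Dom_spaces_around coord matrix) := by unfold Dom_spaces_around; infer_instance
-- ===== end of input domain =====

-- B replaces A's build-9-pairs / dedup / sort with per-axis sorted distinct clamped values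
-- whose Cartesian product is already sorted — simpler decomposition, same result.


-- ===== PORT A =====
def spaces_around (coord : List Int) (matrix : List (List Int)) : List (List Int) :=
  let y_range : Int := PySem.List.len matrix - 1
  let x_range : Int := PySem.List.len (PySem.List.pyGetD matrix 0 []) - 1
  let check_range := PySem.List.pyRange (-1) 2 1
  let coords_around : List (List Int) :=
    check_range.flatMap (fun y => check_range.map (fun x =>
      [min y_range (max 0 (PySem.List.pyGetD coord 0 0 + y)),
       min x_range (max 0 (PySem.List.pyGetD coord 1 0 + x))]))
  -- set(tuple(x) for x in …) then [list(x) for x in …]: the tuple/list round trip;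
  -- 2-tuple equality is elementwise, so the set of tuples is modelled exactly as a Set of the lists
  let coords_dedup : List (List Int) := PySem.Set.ofList coords_around
  PySem.List.sorted coords_dedup (fun l => l)

-- ===== PORT B =====
def spaces_around_alt (coord : List Int) (matrix : List (List Int)) : List (List Int) :=
  let y_range : Int := PySem.List.len matrix - 1
  let x_range : Int := PySem.List.len (PySem.List.pyGetD matrix 0 []) - 1
  let ys := PySem.List.sorted (PySem.Set.ofList ((PySem.List.pyRange (-1) 2 1).map
      (fun d => min y_range (max 0 (PySem.List.pyGetD coord 0 0 + d))))) (fun v => v)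
  let xs := PySem.List.sorted (PySem.Set.ofList ((PySem.List.pyRange (-1) 2 1).map
      (fun d => min x_range (max 0 (PySem.List.pyGetD coord 1 0 + d))))) (fun v => v)
  ys.flatMap (fun cy => xs.map (fun cx => [cy, cx]))

-- ===== PRECONDITION & SPEC =====
-- Pre_ excludes exactly the inputs where Python A raises IndexError: matrix == [] (matrix[0])
-- or len(coord) < 2 (coord[1]); B raises identically there.
def Pre_spaces_around (coord : List Int) (matrix : List (List Int)) : Prop :=
  matrix ≠ [] ∧ 2 ≤ coord.length
instance (coord : List Int) (matrix : List (List Int)) : Decidable (Pre_spaces_around coord matrix) := by unfold Pre_spaces_around; infer_instance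
def pvWitness_spaces_around : List Int × List (List Int) := ([0, 1], [[5, 6], [7, 8]])

def Spec_spaces_around (coord : List Int) (matrix : List (List Int)) (out : List (List Int)) : Prop := out = spaces_around_alt coord matrix
instance (coord : List Int) (matrix : List (List Int)) (out : List (List Int)) : Decidable (Spec_spaces_around coord matrix out) := by unfold Spec_spaces_around; infer_instance

-- ===== CLAIM (what is proved, stated in full; the proofs are below) =====
def Claim_equal_spaces_around : Prop := ∀ (coord : List Int) (matrix : List (List Int)), Dom_spaces_around coord matrix → Pre_spaces_around coord matrix → Spec_spaces_around coord matrix (spaces_around coord matrix)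

-- ===== LEMMAS AND PROOFS =====

-- the Cartesian product of two strictly increasing Int lists is strictly increasing lexicographically
lemma pairwise_lt_prod (Y X : List Int)
    (hY : Y.Pairwise (· < ·)) (hX : X.Pairwise (· < ·)) :
    (Y.flatMap (fun cy => X.map (fun cx => [cy, cx]))).Pairwise (· < ·) := by
  induction Y with
  | nil => simp
  | cons y Y' ih =>
    rw [List.pairwise_cons] at hY
    rw [List.flatMap_cons, List.pairwise_append]
    refine ⟨?_, ih hY.2, ?_⟩
    · rw [List.pairwise_map]
      exact hX.imp (fun {a b} hab => by
        rw [List.cons_lt_cons_iff]; exact Or.inr ⟨rfl, by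
          rw [List.cons_lt_cons_iff]; exact Or.inl hab⟩)
    · intro a ha b hb
      obtain ⟨x, _, rfl⟩ := List.mem_map.mp ha
      obtain ⟨y', hy', x', _, rfl⟩ := by
        simpa using List.mem_flatMap.mp hb
      rw [List.cons_lt_cons_iff]
      exact Or.inl (hY.1 y' hy')

-- the shared core: sorted(set(product raw lists)) = product of the per-axis sorted sets
lemma prod_sorted (ysRaw xsRaw : List Int) :
    PySem.List.sorted (PySem.Set.ofList (ysRaw.flatMap (fun y => xsRaw.map (fun x => [y, x])))) (fun l => l)
      = (PySem.List.sorted (PySem.Set.ofList ysRaw) (fun v => v)).flatMap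
          (fun cy => (PySem.List.sorted (PySem.Set.ofList xsRaw) (fun v => v)).map (fun cx => [cy, cx])) := by
  have hY := PySem.List.sorted_ofList_pairwise_lt ysRaw
  have hX := PySem.List.sorted_ofList_pairwise_lt xsRaw
  have hpw := pairwise_lt_prod _ _ hY hX
  have hperm : (PySem.List.sorted (PySem.Set.ofList ysRaw) (fun v => v)).flatMap
      (fun cy => (PySem.List.sorted (PySem.Set.ofList xsRaw) (fun v => v)).map (fun cx => [cy, cx]))
      |>.Perm (PySem.Set.ofList (ysRaw.flatMap (fun y => xsRaw.map (fun x => [y, x])))) := by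
    rw [List.perm_ext_iff_of_nodup (hpw.imp (fun h => ne_of_lt h)) (PySem.Set.nodup_ofList _)]
    intro a
    simp [PySem.Set.mem_ofList, PySem.List.mem_sorted, List.mem_flatMap, List.mem_map]
  rw [show (fun (a b : List Int) => a.decidableLT b) = (LinearOrder.toDecidableLT : DecidableLT (List Int)) from Subsingleton.elim _ _]
  exact PySem.List.sorted_eq_of_perm_of_pairwise_lt _ _ _ hperm hpw

-- prod_sorted specialised to the shape both ports share: per-cell clamping is componentwise
lemma prod_sorted' (f g : Int → Int) (cr : List Int) :
    PySem.List.sorted (PySem.Set.ofList (cr.flatMap (fun y => cr.map (fun x => [f y, g x])))) (fun l => l)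
      = (PySem.List.sorted (PySem.Set.ofList (cr.map f)) (fun v => v)).flatMap
          (fun cy => (PySem.List.sorted (PySem.Set.ofList (cr.map g)) (fun v => v)).map (fun cx => [cy, cx])) := by
  have h : cr.flatMap (fun y => cr.map (fun x => [f y, g x]))
      = (cr.map f).flatMap (fun y => (cr.map g).map (fun x => [y, x])) := by
    simp [List.flatMap_map, List.map_map, Function.comp_def]
  rw [h, prod_sorted]

-- ===== VERDICT (by name: the statement is the Claim_ definition above) =====
theorem spaces_around_spec : Claim_equal_spaces_around := by
  intro coord matrix _ _
  unfold Spec_spaces_around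
  show PySem.List.sorted _ _ = _
  exact prod_sorted' _ _ _
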